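-- pv_equiv track=rewrite | github.com/sfw/loom | src/loom/engine/verification.py | _extract_issues_from_text
-- ===== SOURCE A (Python) =====
-- def _extract_issues_from_text(text: str) -> list[str]:
--     lines = str(text or "").splitlines()
--     issues: list[str] = []
--     capture = False
--     for raw in lines:
--         line = raw.strip()
--         if not line:
--             if capture:
--                 break
--             continue
--         lowered = line.lower()
--         if lowered.startswith("issues:"):
--             capture = True
--             trailing = line.split(":", 1)[1].strip()
--             if trailing and trailing.lower() not in {"none", "no issues", "n/a"}:
--                 issues.append(trailing)
--             continue
--         if capture:
--             if line.startswith(("-", "*", "•")):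
--                 issues.append(line.lstrip("-*• ").strip())
--                 continue
--             if ":" in line and not line.startswith(("-", "*", "•")):
--                 break
--             issues.append(line.strip())
--     return [item for item in issues if item]
-- ===== SOURCE B (Python) =====
-- _SENTINELS = {"none", "no issues", "n/a"}
-- _BULLETS = ("-", "*", "\u2022")
--
--
-- def _is_header(line):
--     return line.lower().startswith("issues:")
--
--
-- def _stops(line):
--     """A stripped line ends the issues block: blank, or a colon line that is
--     neither a bullet nor another issues header."""
--     return not line or (":" in line
--                         and not line.startswith(_BULLETS)
--                         and not _is_header(line))
--
--
-- def _render(line):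
--     """The item contributed by one stripped line of the issues block ('' = no item)."""
--     if _is_header(line):
--         t = line.split(":", 1)[1].strip()
--         return "" if t.lower() in _SENTINELS else t
--     if line.startswith(_BULLETS):
--         return line.lstrip("-*\u2022 ").strip()
--     return line
--
--
-- def _extract_issues_from_text(text: str) -> list[str]:
--     lines = [raw.strip() for raw in str(text or "").splitlines()]
--     n = len(lines)
--     start = next((i for i, l in enumerate(lines) if _is_header(l)), n)
--     stop = next((j for j in range(start + 1, n) if _stops(lines[j])), n)
--     return [item for item in map(_render, lines[start:stop]) if item]
-- ===== Notes on version B (the rewrite author's own statement) =====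
-- stated objective: alternative
-- what changed: A's single stateful scan with a capture flag (whose branch taken per line depends on the flag) is replaced by a loop-free region computation: find the index of the first 'issues:' header, find the index of the first terminating line after it, slice that region and map a stateless per-line render function over it, filtering empty items.
import Mathlib
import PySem

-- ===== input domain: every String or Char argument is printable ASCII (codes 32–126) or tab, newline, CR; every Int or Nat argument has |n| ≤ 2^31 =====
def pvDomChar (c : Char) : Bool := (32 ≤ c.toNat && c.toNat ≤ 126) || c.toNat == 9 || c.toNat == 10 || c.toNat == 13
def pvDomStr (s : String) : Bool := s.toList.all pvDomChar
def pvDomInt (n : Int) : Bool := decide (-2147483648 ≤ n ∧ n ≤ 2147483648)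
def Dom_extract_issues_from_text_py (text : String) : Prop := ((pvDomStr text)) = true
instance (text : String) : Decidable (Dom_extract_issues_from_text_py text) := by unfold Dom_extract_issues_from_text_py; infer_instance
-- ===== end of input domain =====

-- B replaces A's stateful capture-flag scan by a loop-free region computation: find the
-- header index, find the block's end index, then render each line of the region with a
-- stateless per-line function and filter; objective: alternative (same cost).


-- str.lstrip(chars): drop leading characters occurring in chars (exact; PySem has no lstrip-with-chars; used by both pythons)
def pvLstripChars (s : String) (chars : String) : String :=
  String.ofList (s.toList.dropWhile (fun c => chars.toList.contains c))

-- ===== PORT A =====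
def pvA_isHeader (line : String) : Bool := PySem.Str.startswith (PySem.Str.lower line) "issues:"
-- line.split(":", 1)[1]: whenever this is used, ':' is present in line (the line starts with "issues:"
-- up to case), so the split has an index 1; pyGetD's default "" is never taken
def pvA_trailing (line : String) : String :=
  PySem.Str.strip (PySem.List.pyGetD ((PySem.Str.splitMax? line ":" 1).getD []) 1 "")
def pvA_keep (t : String) : Bool := t != "" && !(["none", "no issues", "n/a"].contains (PySem.Str.lower t))
def pvA_isBullet (line : String) : Bool :=
  PySem.Str.startswith line "-" || PySem.Str.startswith line "*" || PySem.Str.startswith line "•"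
-- the for-loop of A: state (issues, capture); returning issues = Python's break / end of the loop
def pvA_loop : List String → List String → Bool → List String
  | [], issues, _ => issues
  | raw :: rest, issues, capture =>
    let line := PySem.Str.strip raw
    if line = "" then
      if capture then issues else pvA_loop rest issues capture
    else if pvA_isHeader line then
      let trailing := pvA_trailing line
      if pvA_keep trailing then pvA_loop rest (issues ++ [trailing]) true
      else pvA_loop rest issues true
    else if capture then
      if pvA_isBullet line then
        pvA_loop rest (issues ++ [PySem.Str.strip (pvLstripChars line "-*• ")]) capture
      else if PySem.Str.isIn ":" line && !pvA_isBullet line then issues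
      else pvA_loop rest (issues ++ [PySem.Str.strip line]) capture
    else pvA_loop rest issues capture

def extract_issues_from_text_py (text : String) : List String :=
  (pvA_loop (PySem.Str.splitlines text) [] false).filter (fun item => item != "")

-- ===== PORT B =====
def pvB_isHeader (line : String) : Bool := PySem.Str.startswith (PySem.Str.lower line) "issues:"
def pvB_isBullet (line : String) : Bool :=
  PySem.Str.startswith line "-" || PySem.Str.startswith line "*" || PySem.Str.startswith line "•"
-- _stops: a stripped line ends the issues block
def pvB_stops (line : String) : Bool :=
  line == "" || (PySem.Str.isIn ":" line && !pvB_isBullet line && !pvB_isHeader line)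
-- _render: the item contributed by one stripped line of the block ("" = no item)
def pvB_render (line : String) : String :=
  if pvB_isHeader line then
    let t := PySem.Str.strip (PySem.List.pyGetD ((PySem.Str.splitMax? line ":" 1).getD []) 1 "")
    if ["none", "no issues", "n/a"].contains (PySem.Str.lower t) then "" else t
  else if pvB_isBullet line then PySem.Str.strip (pvLstripChars line "-*• ")
  else line

-- start = next(i for … if header) with default n = List.findIdx (length if absent);
-- stop  = next(j in range(start+1, n) if stops) with default n, computed as
--         start+1 + findIdx over the lines after start (≥ n exactly when absent)
def extract_issues_from_text_py_alt (text : String) : List String :=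
  let lines := (PySem.Str.splitlines text).map PySem.Str.strip
  let start := lines.findIdx pvB_isHeader
  let stop := start + 1 + (lines.drop (start + 1)).findIdx pvB_stops
  (((lines.drop start).take (stop - start)).map pvB_render).filter (fun item => item != "")

-- ===== PRECONDITION & SPEC =====
def Spec_extract_issues_from_text_py (text : String) (out : List String) : Prop := out = extract_issues_from_text_py_alt text
instance (text : String) (out : List String) : Decidable (Spec_extract_issues_from_text_py text out) := by unfold Spec_extract_issues_from_text_py; infer_instance

-- ===== CLAIM (what is proved, stated in full; the proofs are below) =====
def Claim_equal_extract_issues_from_text_py : Prop := ∀ (text : String), Dom_extract_issues_from_text_py text → Spec_extract_issues_from_text_py text (extract_issues_from_text_py text)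

-- ===== LEMMAS AND PROOFS =====

-- the region B slices out of the stripped lines, as a function of the stripped lines
def pvB_core (lines : List String) : List String :=
  let start := lines.findIdx pvB_isHeader
  let stop := start + 1 + (lines.drop (start + 1)).findIdx pvB_stops
  (((lines.drop start).take (stop - start)).map pvB_render).filter (fun item => item != "")

theorem pvB_alt_core (text : String) :
    extract_issues_from_text_py_alt text = pvB_core ((PySem.Str.splitlines text).map PySem.Str.strip) := rfl

theorem pvTake_findIdx {α : Type} (p : α → Bool) (l : List α) :
    l.take (l.findIdx p) = l.takeWhile (fun x => !p x) := by
  induction l with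
  | nil => rfl
  | cons a l ih =>
    by_cases h : p a
    · simp [List.findIdx_cons, h]
    · simp [List.findIdx_cons, h, ih]

theorem pvStrip_idem (s : List Char) : PySem.Chars.strip (PySem.Chars.strip s) = PySem.Chars.strip s := by
  unfold PySem.Chars.strip PySem.Chars.rstrip PySem.Chars.lstrip
  set p := PySem.Chars.isspace
  set u := List.dropWhile p s with hu
  have hui : List.dropWhile p u = u := List.dropWhile_idempotent p s
  set w := List.dropWhile p u.reverse with hw
  have hpre : w.reverse <+: u := by
    have : w <:+ u.reverse := List.dropWhile_suffix p
    simpa using this.reverse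
  have h1 : List.dropWhile p w.reverse = w.reverse := by
    rw [List.dropWhile_eq_self_iff]
    intro hlen
    have hlt : 0 < u.length := lt_of_lt_of_le hlen hpre.length_le
    have hhead := List.dropWhile_eq_self_iff.mp hui hlt
    have heq : w.reverse[0] = u[0] := hpre.getElem hlen
    rw [heq]; exact hhead
  rw [h1, List.reverse_reverse, List.dropWhile_idempotent]

theorem pvStrStrip_idem (s : String) : PySem.Str.strip (PySem.Str.strip s) = PySem.Str.strip s := by
  simp [PySem.Str.strip, pvStrip_idem]

theorem pvA_keep_imp (t : String) (h : pvA_keep t = true) : t ≠ "" := by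
  simp only [pvA_keep, Bool.and_eq_true, bne_iff_ne] at h
  exact h.1

-- on a header line, B's render is A's trailing when A keeps it, "" otherwise
theorem pv_render_header (line : String) (h : pvB_isHeader line = true) :
    pvB_render line = if pvA_keep (pvA_trailing line) = true then pvA_trailing line else "" := by
  have h1 : pvB_render line =
      (if ["none", "no issues", "n/a"].contains (PySem.Str.lower (pvA_trailing line)) then ""
       else pvA_trailing line) := by
    simp [pvB_render, h, pvA_trailing]
  rw [h1]
  by_cases hc : (["none", "no issues", "n/a"].contains (PySem.Str.lower (pvA_trailing line))) = true
  · have hk : pvA_keep (pvA_trailing line) = false := by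
      simp only [pvA_keep, hc, Bool.not_true, Bool.and_false]
    rw [if_pos hc, hk]; simp
  · have hc' : (["none", "no issues", "n/a"].contains (PySem.Str.lower (pvA_trailing line))) = false := by
      simpa using hc
    rw [if_neg hc]
    by_cases h0 : pvA_trailing line = ""
    · have hk : pvA_keep (pvA_trailing line) = false := by simp [pvA_keep, h0]
      rw [hk]; simp [h0]
    · have hk : pvA_keep (pvA_trailing line) = true := by
        simp only [pvA_keep, hc', Bool.not_false, Bool.and_true]
        exact bne_iff_ne.mpr h0
      rw [hk]; simp

-- capture phase: A's filtered loop over rest = B's rendered/filtered takeWhile region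
theorem pvA_capture_eq (rest : List String) : ∀ acc : List String,
    (pvA_loop rest acc true).filter (fun item => item != "") =
      acc.filter (fun item => item != "") ++
        (((rest.map PySem.Str.strip).takeWhile (fun l => !pvB_stops l)).map pvB_render).filter
          (fun item => item != "") := by
  induction rest with
  | nil => intro acc; simp [pvA_loop]
  | cons raw rest ih =>
    intro acc
    simp only [pvA_loop, List.map_cons, List.takeWhile_cons]
    set line := PySem.Str.strip raw with hline
    by_cases h0 : line = ""
    · rw [h0]
      have hs : pvB_stops "" = true := by decide
      simp [hs]
    · have hne : (line == "") = false := by simpa using h0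
      by_cases h1 : pvA_isHeader line = true
      · have hH : pvB_isHeader line = true := h1
        have hs : pvB_stops line = false := by simp [pvB_stops, hne, hH]
        simp only [h0, if_false, h1, if_true, hs, Bool.not_false, if_true, List.map_cons,
          List.filter_cons, pv_render_header line hH]
        by_cases h2 : pvA_keep (pvA_trailing line) = true
        · have ht : pvA_trailing line ≠ "" := pvA_keep_imp _ h2
          rw [if_pos h2, ih, List.filter_append]
          simp [h2, ht]
        · rw [if_neg h2, ih]
          simp [h2]
      · have h1' : pvA_isHeader line = false := by simpa using h1
        have hH : pvB_isHeader line = false := h1'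
        simp only [h0, if_false, h1', Bool.false_eq_true, if_false, if_true]
        by_cases h3 : pvA_isBullet line = true
        · have hB : pvB_isBullet line = true := h3
          have hs : pvB_stops line = false := by simp [pvB_stops, hne, hB]
          have hr : pvB_render line = PySem.Str.strip (pvLstripChars line "-*• ") := by
            simp [pvB_render, hH, hB]
          rw [if_pos h3, ih, List.filter_append]
          simp only [hs, Bool.not_false, if_true, List.map_cons, List.filter_cons, hr]
          by_cases hx : PySem.Str.strip (pvLstripChars line "-*• ") = ""
          · simp [hx]
          · simp [hx]
        · have h3' : pvA_isBullet line = false := by simpa using h3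
          have hB : pvB_isBullet line = false := h3'
          by_cases h4 : PySem.Str.isIn ":" line = true
          · have h4c : PySem.Chars.isIn [':'] line.toList = true := by
              simpa [PySem.Str.isIn] using h4
            have hs : pvB_stops line = true := by simp [pvB_stops, h4c, hB, hH]
            rw [if_neg h3]
            simp [h4c, h3', hs]
          · have h4' : PySem.Str.isIn ":" line = false := by simpa using h4
            have h4c : PySem.Chars.isIn [':'] line.toList = false := by
              simpa [PySem.Str.isIn] using h4'
            have hs : pvB_stops line = false := by simp [pvB_stops, hne, h4c]
            have hr : pvB_render line = line := by simp [pvB_render, hH, hB]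
            have hsi : PySem.Str.strip line = line := by rw [hline]; exact pvStrStrip_idem raw
            rw [if_neg h3]
            simp only [hsi]
            simp [h4c, hs, hr, h0, ih, List.filter_append]

-- pvB_core over a list starting at its header = render/filter of header :: takeWhile region
theorem pvB_core_header (s : String) (L : List String) (h : pvB_isHeader s = true) :
    pvB_core (s :: L) =
      ((s :: L.takeWhile (fun l => !pvB_stops l)).map pvB_render).filter (fun item => item != "") := by
  simp only [pvB_core, List.findIdx_cons, h, cond_true, List.drop_zero,
    List.drop_succ_cons]
  rw [show (0 + 1 + L.findIdx pvB_stops - 0) = L.findIdx pvB_stops + 1 by omega]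
  rw [List.take_succ_cons, pvTake_findIdx]

theorem pvB_core_skip (s : String) (L : List String) (h : pvB_isHeader s = false) :
    pvB_core (s :: L) = pvB_core L := by
  simp only [pvB_core, List.findIdx_cons, h, cond_false, List.drop_succ_cons]
  have : L.findIdx pvB_isHeader + 1 + 1 + (L.drop (L.findIdx pvB_isHeader + 1)).findIdx pvB_stops -
      (L.findIdx pvB_isHeader + 1) =
      L.findIdx pvB_isHeader + 1 + (L.drop (L.findIdx pvB_isHeader + 1)).findIdx pvB_stops -
      L.findIdx pvB_isHeader := by omega
  rw [this]

-- scan phase: A's filtered loop from the start = B's region computation on the stripped lines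
theorem pvA_scan_eq (lines : List String) :
    (pvA_loop lines [] false).filter (fun item => item != "") =
      pvB_core (lines.map PySem.Str.strip) := by
  induction lines with
  | nil => simp [pvA_loop, pvB_core]
  | cons raw rest ih =>
    simp only [pvA_loop, List.map_cons]
    set line := PySem.Str.strip raw with hline
    by_cases h1 : pvA_isHeader line = true
    · have h0 : line ≠ "" := by
        intro he; rw [he] at h1; exact absurd h1 (by decide)
      have hH : pvB_isHeader line = true := h1
      rw [pvB_core_header _ _ hH]
      simp only [h0, if_false, h1, if_true, List.map_cons, List.filter_cons,
        pv_render_header line hH]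
      by_cases h2 : pvA_keep (pvA_trailing line) = true
      · have ht : pvA_trailing line ≠ "" := pvA_keep_imp _ h2
        rw [if_pos h2, pvA_capture_eq]
        simp [h2, ht]
      · rw [if_neg h2, pvA_capture_eq]
        simp [h2]
    · have h1' : pvA_isHeader line = false := by simpa using h1
      have hH : pvB_isHeader line = false := h1'
      rw [pvB_core_skip _ _ hH]
      by_cases h0 : line = ""
      · simpa [h0] using ih
      · simpa [h0, h1'] using ih

-- ===== VERDICT (by name: the statement is the Claim_ definition above) =====
theorem extract_issues_from_text_py_spec : Claim_equal_extract_issues_from_text_py := by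
  intro text _
  unfold Spec_extract_issues_from_text_py
  rw [pvB_alt_core, extract_issues_from_text_py]
  exact pvA_scan_eq _
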